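-- pv_equiv track=rewrite | github.com/ministryofjustice/cica-review-case-documents-airflow | local-dev-environment/testing/term_matching.py | check_terms_by_expected_chunks
-- ===== SOURCE A (Python) =====
-- def check_terms_by_expected_chunks(
--     returned_chunk_ids: list[str],
--     search_term: str,
--     acceptable_terms: str,
--     term_to_expected_chunks: dict[str, set[str]],
-- ) -> dict[str, int]:
--     """Check term relevance using expected chunk IDs from other search terms.
--
--     This is used for semantic-only or hybrid search where text matching isn't
--     meaningful. Instead, we check if any of the returned chunks are in the
--     expected chunks for the acceptable terms.
--
--     Args:
--         returned_chunk_ids: List of chunk IDs returned from search.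
--         search_term: The primary search term.
--         acceptable_terms: Comma-separated acceptable associated terms.
--         term_to_expected_chunks: Dict mapping search terms to their expected chunk IDs.
--
--     Returns:
--         Dictionary with counts of chunks that overlap with expected chunks for each term type.
--     """
--     returned_set = set(returned_chunk_ids)
--     search_term_lower = search_term.lower().strip()
--
--     # Parse and deduplicate term lists
--     acceptable_list = [t.strip().lower() for t in acceptable_terms.split(",") if t.strip()]
--     acceptable_list = [t for t in acceptable_list if t != search_term_lower]
--
--     # Get expected chunks for the search term itself
--     search_term_expected = term_to_expected_chunks.get(search_term_lower, set())
--     chunks_with_search_term = len(returned_set & search_term_expected)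
--
--     # Get expected chunks for acceptable terms
--     acceptable_expected: set[str] = set()
--     for term in acceptable_list:
--         acceptable_expected.update(term_to_expected_chunks.get(term, set()))
--     chunks_with_acceptable = len(returned_set & acceptable_expected)
--
--     # Any term = union of all expected chunks
--     all_expected = search_term_expected | acceptable_expected
--     chunks_with_any_term = len(returned_set & all_expected)
--
--     return {
--         "chunks_with_search_term": chunks_with_search_term,
--         "chunks_with_acceptable": chunks_with_acceptable,
--         "chunks_with_any_term": chunks_with_any_term,
--         "total_chunks_checked": len(returned_chunk_ids),
--     }
-- ===== SOURCE B (Python) =====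
-- def check_terms_by_expected_chunks(
--     returned_chunk_ids: list[str],
--     search_term: str,
--     acceptable_terms: str,
--     term_to_expected_chunks: dict[str, set[str]],
-- ) -> dict[str, int]:
--     """Single counting pass over the distinct returned ids instead of set
--     intersections and a union set."""
--     search_term_lower = search_term.lower().strip()
--
--     acceptable_list = [t.strip().lower() for t in acceptable_terms.split(",") if t.strip()]
--     acceptable_list = [t for t in acceptable_list if t != search_term_lower]
--
--     search_term_expected = term_to_expected_chunks.get(search_term_lower, set())
--     acceptable_expected: set[str] = set()
--     for term in acceptable_list:
--         acceptable_expected.update(term_to_expected_chunks.get(term, set()))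
--
--     n_search = 0
--     n_acceptable = 0
--     n_any = 0
--     seen: set[str] = set()
--     for cid in returned_chunk_ids:
--         if cid in seen:
--             continue
--         seen.add(cid)
--         in_search = cid in search_term_expected
--         in_acceptable = cid in acceptable_expected
--         n_search += in_search
--         n_acceptable += in_acceptable
--         n_any += in_search or in_acceptable
--
--     return {
--         "chunks_with_search_term": n_search,
--         "chunks_with_acceptable": n_acceptable,
--         "chunks_with_any_term": n_any,
--         "total_chunks_checked": len(returned_chunk_ids),
--     }
-- ===== Notes on version B (the rewrite author's own statement) =====
-- stated objective: alternative
-- what changed: Replaced the three set intersections and the union set by a single counting pass over the returned ids with an on-the-fly seen-set and three integer counters; the all_expected union set is never built.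
import Mathlib
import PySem

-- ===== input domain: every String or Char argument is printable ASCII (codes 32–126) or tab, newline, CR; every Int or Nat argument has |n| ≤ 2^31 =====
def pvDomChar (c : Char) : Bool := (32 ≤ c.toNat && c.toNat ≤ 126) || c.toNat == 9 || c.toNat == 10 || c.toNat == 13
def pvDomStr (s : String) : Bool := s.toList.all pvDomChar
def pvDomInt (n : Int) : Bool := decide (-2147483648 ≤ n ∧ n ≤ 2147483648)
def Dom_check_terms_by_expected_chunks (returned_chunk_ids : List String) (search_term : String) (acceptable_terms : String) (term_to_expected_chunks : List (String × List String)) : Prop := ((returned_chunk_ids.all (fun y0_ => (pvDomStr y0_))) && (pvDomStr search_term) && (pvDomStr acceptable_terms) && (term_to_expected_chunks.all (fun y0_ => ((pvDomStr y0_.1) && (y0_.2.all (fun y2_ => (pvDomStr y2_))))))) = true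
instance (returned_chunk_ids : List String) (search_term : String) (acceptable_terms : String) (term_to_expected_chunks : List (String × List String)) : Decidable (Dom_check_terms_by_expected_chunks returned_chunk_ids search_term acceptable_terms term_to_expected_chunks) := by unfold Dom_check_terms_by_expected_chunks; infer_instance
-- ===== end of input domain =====

-- B replaces A's three set intersections and union set by a single counting pass over the
-- distinct returned ids with three integer counters (objective: alternative decomposition).

-- ===== PORT A =====
-- dict.get(k, default): first match in the association list
def pvDictGet (d : List (String × List String)) (k : String) : List String :=
  ((d.find? (fun p => p.1 == k)).map (·.2)).getD []

def check_terms_by_expected_chunks (returned_chunk_ids : List String) (search_term : String) (acceptable_terms : String) (term_to_expected_chunks : List (String × List String)) : List (String × Int) :=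
  let returned_set := PySem.Set.ofList returned_chunk_ids
  let search_term_lower := PySem.Str.strip (PySem.Str.lower search_term)
  let acceptable_list :=
    (((PySem.Str.split? acceptable_terms ",").getD []).filter
      (fun t => PySem.Str.strip t ≠ "")).map (fun t => PySem.Str.lower (PySem.Str.strip t))
  let acceptable_list := acceptable_list.filter (fun t => t ≠ search_term_lower)
  let search_term_expected := pvDictGet term_to_expected_chunks search_term_lower
  let chunks_with_search_term : Int :=
    ((PySem.Set.inter returned_set search_term_expected).length : Int)
  let acceptable_expected :=
    acceptable_list.foldl (fun s term => PySem.Set.update s (pvDictGet term_to_expected_chunks term)) PySem.Set.empty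
  let chunks_with_acceptable : Int :=
    ((PySem.Set.inter returned_set acceptable_expected).length : Int)
  let all_expected := PySem.Set.union (PySem.Set.ofList search_term_expected) acceptable_expected
  let chunks_with_any_term : Int :=
    ((PySem.Set.inter returned_set all_expected).length : Int)
  [("chunks_with_search_term", chunks_with_search_term),
   ("chunks_with_acceptable", chunks_with_acceptable),
   ("chunks_with_any_term", chunks_with_any_term),
   ("total_chunks_checked", (returned_chunk_ids.length : Int))]

-- ===== PORT B =====
-- B's counting loop: one pass, skipping already-seen ids, three counters
def pvCountLoop (sE aE : List String) : List String → PySem.Set String → Int → Int → Int → Int × Int × Int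
  | [], _, ns, na, nn => (ns, na, nn)
  | cid :: rest, seen, ns, na, nn =>
    if PySem.Set.contains seen cid then
      pvCountLoop sE aE rest seen ns na nn
    else
      let in_search := sE.contains cid
      let in_acceptable := aE.contains cid
      pvCountLoop sE aE rest (PySem.Set.add seen cid)
        (ns + (if in_search then 1 else 0))
        (na + (if in_acceptable then 1 else 0))
        (nn + (if in_search || in_acceptable then 1 else 0))

def check_terms_by_expected_chunks_alt (returned_chunk_ids : List String) (search_term : String) (acceptable_terms : String) (term_to_expected_chunks : List (String × List String)) : List (String × Int) :=
  let search_term_lower := PySem.Str.strip (PySem.Str.lower search_term)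
  let acceptable_list :=
    (((PySem.Str.split? acceptable_terms ",").getD []).filter
      (fun t => PySem.Str.strip t ≠ "")).map (fun t => PySem.Str.lower (PySem.Str.strip t))
  let acceptable_list := acceptable_list.filter (fun t => t ≠ search_term_lower)
  let search_term_expected := pvDictGet term_to_expected_chunks search_term_lower
  let acceptable_expected :=
    acceptable_list.foldl (fun s term => PySem.Set.update s (pvDictGet term_to_expected_chunks term)) PySem.Set.empty
  let counts := pvCountLoop search_term_expected acceptable_expected returned_chunk_ids PySem.Set.empty 0 0 0
  [("chunks_with_search_term", counts.1),
   ("chunks_with_acceptable", counts.2.1),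
   ("chunks_with_any_term", counts.2.2),
   ("total_chunks_checked", (returned_chunk_ids.length : Int))]

-- ===== PRECONDITION & SPEC =====
def Spec_check_terms_by_expected_chunks (returned_chunk_ids : List String) (search_term : String) (acceptable_terms : String) (term_to_expected_chunks : List (String × List String)) (out : List (String × Int)) : Prop := out = check_terms_by_expected_chunks_alt returned_chunk_ids search_term acceptable_terms term_to_expected_chunks
instance (returned_chunk_ids : List String) (search_term : String) (acceptable_terms : String) (term_to_expected_chunks : List (String × List String)) (out : List (String × Int)) : Decidable (Spec_check_terms_by_expected_chunks returned_chunk_ids search_term acceptable_terms term_to_expected_chunks out) := by unfold Spec_check_terms_by_expected_chunks; infer_instance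

-- ===== CLAIM (what is proved, stated in full; the proofs are below) =====
def Claim_equal_check_terms_by_expected_chunks : Prop := ∀ (returned_chunk_ids : List String) (search_term : String) (acceptable_terms : String) (term_to_expected_chunks : List (String × List String)), Dom_check_terms_by_expected_chunks returned_chunk_ids search_term acceptable_terms term_to_expected_chunks → Spec_check_terms_by_expected_chunks returned_chunk_ids search_term acceptable_terms term_to_expected_chunks (check_terms_by_expected_chunks returned_chunk_ids search_term acceptable_terms term_to_expected_chunks)

-- ===== LEMMAS AND PROOFS =====

-- the loop counts, among the first occurrences of ids of xs not yet in seen, those satisfying each predicate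
theorem pvCountLoop_spec (sE aE : List String) (xs : List String) (seen : PySem.Set String) (ns na nn : Int) :
    pvCountLoop sE aE xs seen ns na nn =
      (ns + (((xs.foldl PySem.Set.add seen).drop seen.length).filter (fun c => sE.contains c)).length,
       na + (((xs.foldl PySem.Set.add seen).drop seen.length).filter (fun c => aE.contains c)).length,
       nn + (((xs.foldl PySem.Set.add seen).drop seen.length).filter (fun c => sE.contains c || aE.contains c)).length) := by
  induction xs generalizing seen ns na nn with
  | nil => simp [pvCountLoop]
  | cons c rest ih =>
    have hpre : ∀ (l : List String) (s : PySem.Set String),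
        l.foldl PySem.Set.add s = s ++ ((PySem.Set.ofList l).filter (fun y => !s.contains y)) := by
      intro l s
      simpa [PySem.Set.update] using PySem.Set.update_eq_append_filter s l
    by_cases hc : c ∈ seen
    · rw [pvCountLoop.eq_2, if_pos ((PySem.Set.contains_iff seen c).mpr hc), ih]
      simp [List.foldl_cons, PySem.Set.add_of_mem hc]
    · rw [pvCountLoop.eq_2, if_neg (by rw [PySem.Set.contains_iff]; exact hc)]
      show pvCountLoop sE aE rest (PySem.Set.add seen c)
            (ns + (if sE.contains c then 1 else 0))
            (na + (if aE.contains c then 1 else 0))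
            (nn + (if sE.contains c || aE.contains c then 1 else 0)) = _
      rw [ih]
      have hadd : PySem.Set.add seen c = seen ++ [c] := PySem.Set.add_of_not_mem hc
      set F := (PySem.Set.ofList rest).filter (fun y => !(seen ++ [c]).contains y) with hF
      have h1 : List.foldl PySem.Set.add (PySem.Set.add seen c) rest = (seen ++ [c]) ++ F := by
        rw [hadd, hpre rest (seen ++ [c])]
      have h2 : List.foldl PySem.Set.add seen (c :: rest) = seen ++ ([c] ++ F) := by
        rw [List.foldl_cons, h1, List.append_assoc]
      have hdropL : ((seen ++ [c]) ++ F).drop (seen ++ [c]).length = F := by rw [List.drop_left]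
      have hdropR : (seen ++ ([c] ++ F)).drop seen.length = c :: F := by rw [List.drop_left]; rfl
      rw [h1, hadd, hdropL, h2, hdropR]
      simp only [List.filter_cons]
      refine Prod.ext ?_ (Prod.ext ?_ ?_)
      all_goals simp only
      all_goals split
      all_goals first
        | (simp only [List.length_cons]; push_cast; ring)
        | ring

-- the whole loop, started empty, computes exactly A's three intersection sizes
theorem pvCounts_eq (rids sE aE : List String) :
    pvCountLoop sE aE rids PySem.Set.empty 0 0 0 =
      (((PySem.Set.inter (PySem.Set.ofList rids) sE).length : Int),
       ((PySem.Set.inter (PySem.Set.ofList rids) aE).length : Int),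
       ((PySem.Set.inter (PySem.Set.ofList rids) (PySem.Set.union (PySem.Set.ofList sE) aE)).length : Int)) := by
  rw [pvCountLoop_spec]
  simp only [PySem.Set.empty]
  rw [← PySem.Set.ofList_eq_foldl]
  have hcu : ∀ c : String, c ∈ PySem.Set.ofList rids →
      ((PySem.Set.union (PySem.Set.ofList sE) aE).contains c : Bool) = (sE.contains c || aE.contains c) := by
    intro c _
    rw [Bool.eq_iff_iff]
    simp [PySem.Set.contains_eq_listContains, PySem.Set.mem_union, PySem.Set.mem_ofList]
  simp only [List.length_nil, List.drop_zero, zero_add, PySem.Set.inter,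
    PySem.Set.contains_eq_listContains]
  rw [List.filter_congr (l := PySem.Set.ofList rids)
      (p := fun x => List.contains ((PySem.Set.ofList sE).union aE) x)
      (q := fun c => sE.contains c || aE.contains c) hcu]

theorem check_terms_by_expected_chunks_spec : Claim_equal_check_terms_by_expected_chunks := by
  intro rids st ats d _
  show check_terms_by_expected_chunks rids st ats d = check_terms_by_expected_chunks_alt rids st ats d
  simp only [check_terms_by_expected_chunks, check_terms_by_expected_chunks_alt]
  rw [pvCounts_eq]
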